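-- pv_equiv track=rewrite | github.com/me13foundation/monorepo | src/domain/validation/optimization/selective_validation.py | _select_type_based
-- ===== SOURCE A (Python) =====
-- from typing import Dict, List, Any, Optional
--
-- def _select_type_based(
--     entity_type: str, entity_data: Dict[str, Any], available_rules: List[str]
-- ) -> List[str]:
--     """Select rules based on entity type characteristics."""
--     # Define rule priorities by entity type
--     type_priorities = {
--         "gene": [
--             "hgnc_nomenclature",
--             "cross_reference_consistency",
--             "genomic_coordinates",
--         ],
--         "variant": [
--             "hgvs_notation_comprehensive",
--             "clinical_significance_comprehensive",
--             "population_frequencies",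
--         ],
--         "phenotype": ["hpo_term_format", "name_consistency", "hpo_hierarchy"],
--         "publication": [
--             "doi_format_accessibility",
--             "author_information",
--             "citation_consistency",
--         ],
--     }
--
--     priorities = type_priorities.get(entity_type, [])
--
--     # Always include high-priority rules
--     selected = [
--         rule for rule in available_rules if any(p in rule for p in priorities)
--     ]
--
--     # Add some additional rules if we have capacity
--     remaining = [rule for rule in available_rules if rule not in selected]
--     if len(selected) < 5 and remaining:
--         selected.extend(remaining[:3])  # Add up to 3 more rules
--
--     return selected
-- ===== SOURCE B (Python) =====
-- def _select_type_based(entity_type, entity_data, available_rules):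
--     """Select rules based on entity type characteristics."""
--     type_priorities = {
--         "gene": [
--             "hgnc_nomenclature",
--             "cross_reference_consistency",
--             "genomic_coordinates",
--         ],
--         "variant": [
--             "hgvs_notation_comprehensive",
--             "clinical_significance_comprehensive",
--             "population_frequencies",
--         ],
--         "phenotype": ["hpo_term_format", "name_consistency", "hpo_hierarchy"],
--         "publication": [
--             "doi_format_accessibility",
--             "author_information",
--             "citation_consistency",
--         ],
--     }
--     priorities = type_priorities.get(entity_type, [])
--
--     selected = []
--     extras = []  # bounded buffer: at most 3 earliest non-matching rules
--     for rule in available_rules: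
--         if any(p in rule for p in priorities):
--             selected.append(rule)
--         elif len(extras) < 3:
--             extras.append(rule)
--     if len(selected) < 5 and extras:
--         selected += extras
--     return selected
-- ===== Notes on version B (the rewrite author's own statement) =====
-- stated objective: alternative
-- what changed: B replaces A's two full comprehensions (the second rescanning selected for membership) with one pass that keeps a bounded buffer of at most 3 earliest non-matching rules, so the full remaining list and the per-rule membership scan disappear.
import Mathlib
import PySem

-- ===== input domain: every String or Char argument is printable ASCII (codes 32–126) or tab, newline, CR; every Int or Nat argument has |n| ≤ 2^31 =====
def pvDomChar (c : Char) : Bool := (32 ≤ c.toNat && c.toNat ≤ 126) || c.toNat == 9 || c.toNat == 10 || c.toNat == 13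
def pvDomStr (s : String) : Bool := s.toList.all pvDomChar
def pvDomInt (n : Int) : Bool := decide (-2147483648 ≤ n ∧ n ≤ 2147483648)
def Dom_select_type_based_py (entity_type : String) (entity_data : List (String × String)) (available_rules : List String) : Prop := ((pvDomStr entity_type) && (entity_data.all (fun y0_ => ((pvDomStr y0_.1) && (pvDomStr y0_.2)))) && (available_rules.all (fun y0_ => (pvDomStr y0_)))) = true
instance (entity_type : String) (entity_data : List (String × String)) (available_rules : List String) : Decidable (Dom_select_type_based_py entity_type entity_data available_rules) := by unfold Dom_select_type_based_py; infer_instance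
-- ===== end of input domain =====

-- B replaces A's two comprehensions (the second rescanning 'selected') by one pass
-- keeping a bounded ≤3-element buffer of the earliest non-matches
-- (objective: alternative; the full 'remaining' list is never built).

-- ===== PORT A =====
-- the type_priorities dict literal (shared data table)
def pvTypePriorities : PySem.Dict String (List String) :=
  PySem.Dict.ofList
    [ ("gene", ["hgnc_nomenclature", "cross_reference_consistency", "genomic_coordinates"])
    , ("variant", ["hgvs_notation_comprehensive", "clinical_significance_comprehensive", "population_frequencies"])
    , ("phenotype", ["hpo_term_format", "name_consistency", "hpo_hierarchy"])
    , ("publication", ["doi_format_accessibility", "author_information", "citation_consistency"]) ]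

def select_type_based_py (entity_type : String) (entity_data : List (String × String)) (available_rules : List String) : List String :=
  let priorities := PySem.Dict.getD pvTypePriorities entity_type []
  let selected := available_rules.filter (fun rule => priorities.any (fun p => PySem.Str.isIn p rule))
  let remaining := available_rules.filter (fun rule => !(selected.contains rule))
  if selected.length < 5 ∧ remaining ≠ [] then selected ++ remaining.take 3 else selected

-- ===== PORT B =====
def select_type_based_py_alt (entity_type : String) (entity_data : List (String × String)) (available_rules : List String) : List String :=
  let priorities := PySem.Dict.getD pvTypePriorities entity_type []
  let se := available_rules.foldl
    (fun (acc : List String × List String) rule =>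
      if priorities.any (fun p => PySem.Str.isIn p rule) then (acc.1 ++ [rule], acc.2)
      else if acc.2.length < 3 then (acc.1, acc.2 ++ [rule]) else acc) ([], [])
  if se.1.length < 5 ∧ se.2 ≠ [] then se.1 ++ se.2 else se.1

-- ===== PRECONDITION & SPEC =====
def Spec_select_type_based_py (entity_type : String) (entity_data : List (String × String)) (available_rules : List String) (out : List String) : Prop := out = select_type_based_py_alt entity_type entity_data available_rules
instance (entity_type : String) (entity_data : List (String × String)) (available_rules : List String) (out : List String) : Decidable (Spec_select_type_based_py entity_type entity_data available_rules out) := by unfold Spec_select_type_based_py; infer_instance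

-- ===== CLAIM =====
def Claim_equal_select_type_based_py : Prop := ∀ (entity_type : String) (entity_data : List (String × String)) (available_rules : List String), Dom_select_type_based_py entity_type entity_data available_rules → Spec_select_type_based_py entity_type entity_data available_rules (select_type_based_py entity_type entity_data available_rules)

-- ===== LEMMAS AND PROOFS =====

-- the fold computes the filter of matches and the 3-truncated filter of non-matches
lemma pvGo_eq (p : String → Bool) (xs sel ext : List String) (hext : ext.length ≤ 3) :
    xs.foldl
      (fun (acc : List String × List String) rule =>
        if p rule then (acc.1 ++ [rule], acc.2)
        else if acc.2.length < 3 then (acc.1, acc.2 ++ [rule]) else acc) (sel, ext)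
    = (sel ++ xs.filter p, (ext ++ xs.filter (fun x => !p x)).take 3) := by
  induction xs generalizing sel ext with
  | nil => simp [List.take_of_length_le hext]
  | cons x xs ih =>
    by_cases h : p x = true
    · simp [List.foldl_cons, h, ih _ _ hext]
    · by_cases hl : ext.length < 3
      · have : (ext ++ [x]).length ≤ 3 := by simp; omega
        simp [List.foldl_cons, h, hl, ih _ _ this]
      · have h3 : ext.length = 3 := by omega
        have htk : ∀ l : List String, (ext ++ l).take 3 = ext := by
          intro l; rw [← h3, List.take_left]
        simp [List.foldl_cons, h, hl, ih _ _ hext, htk]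

-- for rules drawn from available_rules, 'rule not in selected' is just the negated predicate
lemma pv_remaining_eq (p : String → Bool) (xs : List String) :
    xs.filter (fun rule => !((xs.filter p).contains rule)) = xs.filter (fun x => !p x) := by
  apply List.filter_congr
  intro r hr
  by_cases h : p r = true <;> simp [List.mem_filter, hr, h]

-- generic form of the equivalence, for an arbitrary match predicate
lemma pv_main (p : String → Bool) (rules : List String) :
    (if (rules.filter p).length < 5 ∧ rules.filter (fun r => !((rules.filter p).contains r)) ≠ [] then
       rules.filter p ++ (rules.filter (fun r => !((rules.filter p).contains r))).take 3
     else rules.filter p)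
    = (let se := rules.foldl
         (fun (acc : List String × List String) rule =>
           if p rule then (acc.1 ++ [rule], acc.2)
           else if acc.2.length < 3 then (acc.1, acc.2 ++ [rule]) else acc) ([], []);
       if se.1.length < 5 ∧ se.2 ≠ [] then se.1 ++ se.2 else se.1) := by
  rw [pvGo_eq p rules [] [] (by simp), pv_remaining_eq]
  by_cases h : rules.filter (fun x => !p x) = [] <;> simp [h, List.take_eq_nil_iff]

-- ===== VERDICT =====
theorem select_type_based_py_spec : Claim_equal_select_type_based_py := by
  intro et ed rules _
  exact pv_main (fun rule => (PySem.Dict.getD pvTypePriorities et []).any (fun p => PySem.Str.isIn p rule)) rules
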